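-- pv_equiv track=rewrite | github.com/Om-Thapa/Programming | Python/AI_ML_Lab/Embeddings.py | create_index
-- ===== SOURCE A (Python) =====
-- def create_index(sentences):
--     """Create a unique word list (no regex)."""
--     vocab = set()
--     for sent in sentences:
--         for token in sent.split():
--             token = "".join(ch for ch in token if ch.isalnum())
--             if token:
--                 vocab.add(token.lower())
--     return sorted(vocab)
-- ===== SOURCE B (Python) =====
-- def create_index(sentences):
--     """Create a unique word list (no regex)."""
--     index = []
--     for sent in sentences:
--         for tok in sent.split():
--             w = "".join(ch for ch in tok if ch.isalnum()).lower()
--             if not w: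
--                 continue
--             i = 0
--             while i < len(index) and index[i] < w:
--                 i += 1
--             if i == len(index) or index[i] != w:
--                 index.insert(i, w)
--     return index
-- ===== Notes on version B (the rewrite author's own statement) =====
-- stated objective: alternative
-- what changed: Drops the set and the final sort entirely: B maintains one sorted, duplicate-free list during the loop, inserting each cleaned token at its ordered position (skipping it if already present), so the result is ready without any sorting step.
import Mathlib
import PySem

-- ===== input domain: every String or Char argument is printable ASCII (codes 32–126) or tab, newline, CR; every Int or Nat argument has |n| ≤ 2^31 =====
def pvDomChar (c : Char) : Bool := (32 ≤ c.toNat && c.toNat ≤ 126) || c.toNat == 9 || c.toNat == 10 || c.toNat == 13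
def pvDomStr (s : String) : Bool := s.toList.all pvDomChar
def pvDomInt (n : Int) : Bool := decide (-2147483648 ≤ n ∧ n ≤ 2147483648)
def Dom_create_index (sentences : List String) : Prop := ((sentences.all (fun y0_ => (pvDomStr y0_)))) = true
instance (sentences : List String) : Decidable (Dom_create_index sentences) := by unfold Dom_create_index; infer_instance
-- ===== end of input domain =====

-- B keeps one sorted duplicate-free list built by in-place ordered insertion during the loop (no set, no final sort); alternative decomposition, same value.


-- ===== PORT A =====
-- "".join(ch for ch in token if ch.isalnum()) : joining single chars = the string of the filtered chars (exact)
def pvClean (t : String) : String := String.ofList (t.toList.filter PySem.Chars.isalnum)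

def create_index (sentences : List String) : List String :=
  let vocab : PySem.Set String :=
    sentences.foldl (fun vocab sent =>
      (PySem.Str.split₀ sent).foldl (fun vocab token =>
        let token := pvClean token
        if token ≠ "" then PySem.Set.add vocab (PySem.Str.lower token) else vocab)
        vocab)
      PySem.Set.empty
  PySem.List.sorted vocab (fun x => x) false

-- ===== PORT B =====
-- Source B's while-scan ('advance i while index[i] < w') + conditional insert, as the
-- obvious structural recursion over the maintained sorted list
def pvInsertSorted (w : String) : List String → List String
  | [] => [w]
  | x :: xs => if x < w then x :: pvInsertSorted w xs
               else if x ≠ w then w :: x :: xs else x :: xs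

def create_index_alt (sentences : List String) : List String :=
  sentences.foldl (fun index sent =>
    (PySem.Str.split₀ sent).foldl (fun index tok =>
      let w := PySem.Str.lower (pvClean tok)
      if w ≠ "" then pvInsertSorted w index else index)
      index)
    []

-- ===== PRECONDITION & SPEC =====
def Spec_create_index (sentences : List String) (out : List String) : Prop := out = create_index_alt sentences
instance (sentences : List String) (out : List String) : Decidable (Spec_create_index sentences out) := by unfold Spec_create_index; infer_instance

-- ===== CLAIM (what is proved, stated in full; the proofs are below) =====
def Claim_equal_create_index : Prop := ∀ (sentences : List String), Dom_create_index sentences → Spec_create_index sentences (create_index sentences)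

-- ===== LEMMAS AND PROOFS =====

-- the cleaned-lowered token
def pvTok (t : String) : String := PySem.Str.lower (pvClean t)

theorem pvLower_eq_empty_iff (s : String) : (PySem.Str.lower s = "") ↔ s = "" := by
  constructor
  · intro h
    have h2 : (PySem.Str.lower s).toList = ("" : String).toList := by rw [h]
    simp [PySem.Str.toList_lower, PySem.Chars.lower] at h2
    have : s.toList = ("" : String).toList := by simpa using h2
    exact String.toList_inj.mp this
  · intro h; subst h; rfl

-- A-side: membership and nodup of the set fold
theorem pvInner_mem (x : String) (toks : List String) (S : PySem.Set String) :
    x ∈ toks.foldl (fun vocab token =>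
        let token := pvClean token
        if token ≠ "" then PySem.Set.add vocab (PySem.Str.lower token) else vocab) S
      ↔ x ∈ S ∨ x ∈ (toks.map pvTok).filter (fun t => t ≠ "") := by
  induction toks generalizing S with
  | nil => simp
  | cons t ts ih =>
    simp only [List.foldl_cons, List.map_cons, ih]
    by_cases h : pvClean t = ""
    · have hf : pvTok t = "" := by rw [pvTok, h]; rfl
      simp [h, hf]
    · have hf : ¬ pvTok t = "" := fun hh => h ((pvLower_eq_empty_iff (pvClean t)).mp hh)
      simp only [h, hf, ne_eq, not_false_eq_true, if_true, List.filter_cons]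
      simp only [pvTok] at hf ⊢
      simp [PySem.Set.mem_add, or_assoc]

theorem pvInner_nodup (toks : List String) (S : PySem.Set String) (hS : S.Nodup) :
    (toks.foldl (fun vocab token =>
        let token := pvClean token
        if token ≠ "" then PySem.Set.add vocab (PySem.Str.lower token) else vocab) S).Nodup := by
  induction toks generalizing S with
  | nil => simpa
  | cons t ts ih =>
    simp only [List.foldl_cons]
    apply ih
    by_cases h : pvClean t = ""
    · simpa [h]
    · simp only [h, ne_eq, not_false_eq_true, if_true]
      rw [PySem.Set.add_eq_ite]
      split_ifs with hm
      · exact hS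
      · simp [List.nodup_append, hS]
        exact fun a ha heq => hm (heq ▸ ha)

theorem pvOuter_mem (x : String) (sentences : List String) (S : PySem.Set String) :
    x ∈ sentences.foldl (fun vocab sent =>
        (PySem.Str.split₀ sent).foldl (fun vocab token =>
          let token := pvClean token
          if token ≠ "" then PySem.Set.add vocab (PySem.Str.lower token) else vocab) vocab) S
      ↔ x ∈ S ∨ x ∈ ((sentences.flatMap (fun sent => (PySem.Str.split₀ sent).map pvTok)).filter
            (fun t => t ≠ "")) := by
  induction sentences generalizing S with
  | nil => simp
  | cons s ss ih =>
    simp only [List.foldl_cons, List.flatMap_cons, List.filter_append, List.mem_append, ih,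
      pvInner_mem, or_assoc]

theorem pvOuter_nodup (sentences : List String) (S : PySem.Set String) (hS : S.Nodup) :
    (sentences.foldl (fun vocab sent =>
        (PySem.Str.split₀ sent).foldl (fun vocab token =>
          let token := pvClean token
          if token ≠ "" then PySem.Set.add vocab (PySem.Str.lower token) else vocab) vocab) S).Nodup := by
  induction sentences generalizing S with
  | nil => simpa
  | cons s ss ih => exact ih _ (pvInner_nodup _ _ hS)

-- B-side: pvInsertSorted properties
theorem pvIns_mem (x w : String) (l : List String) :
    x ∈ pvInsertSorted w l ↔ x = w ∨ x ∈ l := by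
  induction l with
  | nil => simp [pvInsertSorted]
  | cons y ys ih =>
    by_cases h : y < w
    · rw [pvInsertSorted, if_pos h]
      simp only [List.mem_cons, ih]; tauto
    · by_cases h2 : y = w
      · subst h2
        rw [pvInsertSorted, if_neg h, if_neg (by simp)]
        simp only [List.mem_cons]; tauto
      · rw [pvInsertSorted, if_neg h, if_pos h2]
        simp only [List.mem_cons]

theorem pvIns_pairwise (w : String) (l : List String) (hl : l.Pairwise (· < ·)) :
    (pvInsertSorted w l).Pairwise (· < ·) := by
  induction l with
  | nil => simp [pvInsertSorted]
  | cons y ys ih =>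
    have hy := (List.pairwise_cons.mp hl).1
    have hys := (List.pairwise_cons.mp hl).2
    by_cases h : y < w
    · rw [pvInsertSorted, if_pos h]
      refine List.pairwise_cons.mpr ⟨?_, ih hys⟩
      intro z hz
      rcases (pvIns_mem z w ys).mp hz with rfl | hz
      · exact h
      · exact hy z hz
    · by_cases h2 : y = w
      · subst h2; rw [pvInsertSorted, if_neg h, if_neg (by simp)]; exact hl
      · rw [pvInsertSorted, if_neg h, if_pos h2]
        have hwy : w < y := lt_of_le_of_ne (not_lt.mp h) (Ne.symm h2)
        refine List.pairwise_cons.mpr ⟨?_, hl⟩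
        intro z hz
        rcases List.mem_cons.mp hz with rfl | hz
        · exact hwy
        · exact lt_trans hwy (hy z hz)

-- B inner fold
theorem pvBInner_mem (x : String) (toks : List String) (idx : List String) :
    x ∈ toks.foldl (fun index tok =>
        let w := PySem.Str.lower (pvClean tok)
        if w ≠ "" then pvInsertSorted w index else index) idx
      ↔ x ∈ idx ∨ x ∈ (toks.map pvTok).filter (fun t => t ≠ "") := by
  induction toks generalizing idx with
  | nil => simp
  | cons t ts ih =>
    simp only [List.foldl_cons, List.map_cons, List.filter_cons]
    by_cases h : pvTok t = ""
    · have hstep : (let w := PySem.Str.lower (pvClean t);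
          if w ≠ "" then pvInsertSorted w idx else idx) = idx := by
        simp only [pvTok] at h; simp [h]
      rw [hstep, ih]
      simp [h]
    · have hstep : (let w := PySem.Str.lower (pvClean t);
          if w ≠ "" then pvInsertSorted w idx else idx)
          = pvInsertSorted (pvTok t) idx := by
        simp only [pvTok] at h; simp [h, pvTok]
      rw [hstep, ih]
      simp only [pvIns_mem]
      simp [h, or_assoc]
      exact or_left_comm

theorem pvBInner_pairwise (toks : List String) (idx : List String) (h : idx.Pairwise (· < ·)) :
    (toks.foldl (fun index tok =>
        let w := PySem.Str.lower (pvClean tok)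
        if w ≠ "" then pvInsertSorted w index else index) idx).Pairwise (· < ·) := by
  induction toks generalizing idx with
  | nil => simp only [List.foldl_nil]; exact h
  | cons t ts ih =>
    simp only [List.foldl_cons]
    apply ih
    by_cases hw : PySem.Str.lower (pvClean t) = ""
    · have hstep : (let w := PySem.Str.lower (pvClean t);
          if w ≠ "" then pvInsertSorted w idx else idx) = idx := by simp [hw]
      rw [hstep]; exact h
    · have hstep : (let w := PySem.Str.lower (pvClean t);
          if w ≠ "" then pvInsertSorted w idx else idx)
          = pvInsertSorted (PySem.Str.lower (pvClean t)) idx := by simp [hw]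
      rw [hstep]; exact pvIns_pairwise _ _ h

-- B outer fold
theorem pvBOuter_mem (x : String) (sentences : List String) (idx : List String) :
    x ∈ sentences.foldl (fun index sent =>
        (PySem.Str.split₀ sent).foldl (fun index tok =>
          let w := PySem.Str.lower (pvClean tok)
          if w ≠ "" then pvInsertSorted w index else index) index) idx
      ↔ x ∈ idx ∨ x ∈ ((sentences.flatMap (fun sent => (PySem.Str.split₀ sent).map pvTok)).filter
            (fun t => t ≠ "")) := by
  induction sentences generalizing idx with
  | nil => simp
  | cons s ss ih =>
    simp only [List.foldl_cons, List.flatMap_cons, List.filter_append, List.mem_append, ih,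
      pvBInner_mem, or_assoc]

theorem pvBOuter_pairwise (sentences : List String) (idx : List String)
    (h : idx.Pairwise (· < ·)) :
    (sentences.foldl (fun index sent =>
        (PySem.Str.split₀ sent).foldl (fun index tok =>
          let w := PySem.Str.lower (pvClean tok)
          if w ≠ "" then pvInsertSorted w index else index) index) idx).Pairwise (· < ·) := by
  induction sentences generalizing idx with
  | nil => simp only [List.foldl_nil]; exact h
  | cons s ss ih => exact ih _ (pvBInner_pairwise _ _ h)

-- ===== VERDICT (by name: the statement is the Claim_ definition above) =====
theorem create_index_spec : Claim_equal_create_index := by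
  intro sentences _
  unfold Spec_create_index create_index create_index_alt
  set L := (sentences.flatMap (fun sent => (PySem.Str.split₀ sent).map pvTok)).filter
      (fun t => t ≠ "") with hL
  set vocab := sentences.foldl (fun vocab sent =>
      (PySem.Str.split₀ sent).foldl (fun vocab token =>
        let token := pvClean token
        if token ≠ "" then PySem.Set.add vocab (PySem.Str.lower token) else vocab) vocab)
      PySem.Set.empty with hvocab
  set R := sentences.foldl (fun index sent =>
      (PySem.Str.split₀ sent).foldl (fun index tok =>
        let w := PySem.Str.lower (pvClean tok)
        if w ≠ "" then pvInsertSorted w index else index) index) ([] : List String) with hR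
  have hvn : vocab.Nodup := pvOuter_nodup sentences PySem.Set.empty (by simp [PySem.Set.empty])
  have hRp : R.Pairwise (· < ·) := pvBOuter_pairwise sentences [] (by simp)
  have hRn : R.Nodup := hRp.imp (fun h => ne_of_lt h)
  have hmem : ∀ x, x ∈ R ↔ x ∈ vocab := by
    intro x
    rw [hR, pvBOuter_mem, hvocab, pvOuter_mem]
    simp [PySem.Set.empty]
  have hperm : R.Perm vocab := (List.perm_ext_iff_of_nodup hRn hvn).mpr hmem
  exact PySem.List.sorted_eq_of_perm_of_pairwise_lt vocab R (fun x => x) hperm hRp
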